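-- pv_equiv track=rewrite | github.com/JustAFloatingHead/KuhanPiirran | FunctionOperator.py | particle_nro_of_index
-- ===== SOURCE A (Python) =====
-- def alfanum_str_interval(strin,starting_index): #TESTED #after testing" " option added in the first if
--     #add_to_call_counter("alfanum_str_interval")
--     if is_nro_symbol_sequence(strin[starting_index])==False and strin[starting_index].isalpha()==False and strin[starting_index]!=" ":
--         raise IndexError("Chosen index is doesn't correspond number or letter")
--     start_index=max(starting_index,1) #we do not want to ask what is strin[-1], thus we set start_index at least 1
--     end_index=starting_index
--     while (is_nro_symbol_sequence(strin[max(start_index-1,0)]) or strin[max(start_index-1,0)].isalpha() or strin[max(start_index-1,0)]==" ") and start_index>0: #-1 since there is -1 perfomed in loop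
--         start_index= start_index-1
--     while (is_nro_symbol_sequence(strin[min(end_index,len(strin)-1)]) or strin[min(end_index,len(strin)-1)].isalpha() or strin[min(end_index,len(strin)-1)]==" ")  and end_index<len(strin):
--         end_index= end_index+1
--     return [start_index,end_index]
--
-- def list_of_particles(strin):#TESTED
--     #add_to_call_counter("list_of_particles")
--     running_index=0
--     particles=[]
--     while running_index<len(strin):
--         pair=[running_index,running_index+1]
--         try:
--             pair=alfanum_str_interval(strin,running_index)
--         except IndexError:
--             pair=[running_index,running_index+1]
--         running_index=pair[1]
--         particles.append(strin[pair[0]:pair[1]])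
--     return particles
--
-- def particle_nro_of_index(strin,index):#TESTED
--     if index not in range(len(strin)):
--         raise IndexError("there is no such index in the string")
--     particles=list_of_particles(strin)
--     particle_nro=0
--     running_index=0
--     for i in range(len(particles)):
--         running_index += len(particles[particle_nro])
--         if index<running_index:
--             return particle_nro
--         particle_nro += 1
--     return particle_nro
--
-- def is_nro_symbol_sequence(strin): #TESTED
--     #add_to_call_counter("is_nro_symbol_sequence")
--     for cha in strin:
--         if cha not in ["0","1","2","3","4","5","6","7","8","9","."]:
--             return False
--     return True
-- ===== SOURCE B (Python) =====
-- def particle_nro_of_index(strin, index):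
--     if index not in range(len(strin)):
--         raise IndexError("there is no such index in the string")
--     def tok(c):
--         return c in "0123456789." or c.isalpha() or c == " "
--     count = 0
--     i = 0
--     while i < len(strin):
--         if tok(strin[i]):
--             e = i + 1
--             while e < len(strin) and tok(strin[e]):
--                 e += 1
--         else:
--             e = i + 1
--         if index < e:
--             return count
--         i = e
--         count += 1
--     return count
-- ===== Notes on version B (the rewrite author's own statement) =====
-- stated objective: faster
-- what changed: B fuses tokenization and counting into one early-exit forward scan with a running position and counter, instead of building the full particle list (with its per-token backward scan and try/except IndexError machinery) and then re-scanning cumulative lengths.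
import Mathlib
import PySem

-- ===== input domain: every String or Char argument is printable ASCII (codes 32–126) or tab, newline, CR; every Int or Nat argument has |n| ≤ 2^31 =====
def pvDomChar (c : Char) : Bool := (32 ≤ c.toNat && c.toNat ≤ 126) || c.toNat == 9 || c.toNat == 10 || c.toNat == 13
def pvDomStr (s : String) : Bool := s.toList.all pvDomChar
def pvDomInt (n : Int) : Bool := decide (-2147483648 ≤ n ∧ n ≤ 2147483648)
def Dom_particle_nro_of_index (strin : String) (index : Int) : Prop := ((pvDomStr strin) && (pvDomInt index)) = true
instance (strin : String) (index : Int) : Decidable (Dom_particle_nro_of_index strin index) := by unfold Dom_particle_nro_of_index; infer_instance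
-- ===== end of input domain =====

-- B fuses tokenization and counting into one early-exit forward scan (no particle list, no
-- backward scan, no slice allocation, no exception machinery); measurably faster by a constant factor.

-- ===== PORT A =====
-- for cha in strin: if cha not in ["0",…,"9","."]: return False; return True
def is_nro_symbol_sequence : List Char → Bool
  | [] => true
  | c :: rest =>
    if (['0','1','2','3','4','5','6','7','8','9','.'].contains c) = false then false
    else is_nro_symbol_sequence rest

-- the token-class test A repeats at each site: is_nro_symbol_sequence(ch) or ch.isalpha() or ch==" "
def pvCondA (c : Char) : Bool := is_nro_symbol_sequence [c] || PySem.Chars.isalpha c || (c == ' ')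

-- while (class strin[max(start-1,0)]) and start>0: start -= 1   (Nat s-1 saturates exactly like max(start-1,0))
def pvShrink (l : List Char) (s : Nat) : Nat :=
  if h : pvCondA (l.getD (s - 1) '!') = true ∧ 0 < s then pvShrink l (s - 1) else s
termination_by s
decreasing_by omega

-- while (class strin[min(end,len-1)]) and end<len: end += 1
def pvExtend (l : List Char) (e : Nat) : Nat :=
  if h : pvCondA (l.getD (min e (l.length - 1)) '!') = true ∧ e < l.length then pvExtend l (e + 1) else e
termination_by l.length - e
decreasing_by omega

-- the forward loop never moves left (needed only for termination of list_of_particles)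
theorem pvExtend_ge (l : List Char) (e : Nat) : e ≤ pvExtend l e := by
  rw [pvExtend]
  split
  · have := pvExtend_ge l (e + 1); omega
  · omega
termination_by l.length - e
decreasing_by omega

-- alfanum_str_interval: none = the explicit IndexError raise; indices are always in range at the
-- call sites reachable from the entry (strin nonempty, 0 ≤ i < len), so getD is exact there
def alfanum_str_interval (l : List Char) (si : Nat) : Option (Nat × Nat) :=
  if is_nro_symbol_sequence [l.getD si '!'] = false ∧ PySem.Chars.isalpha (l.getD si '!') = false ∧ l.getD si '!' ≠ ' '
  then none
  else some (pvShrink l (max si 1), pvExtend l si)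

theorem alfanum_snd_gt (l : List Char) (ri : Nat) (h : ri < l.length) (p : Nat × Nat)
    (hp : alfanum_str_interval l ri = some p) : ri < p.2 := by
  unfold alfanum_str_interval at hp
  split at hp
  · exact absurd hp (by simp)
  · rename_i hc
    have hcond : pvCondA (l.getD ri '!') = true := by
      unfold pvCondA
      rcases Bool.eq_false_or_eq_true (is_nro_symbol_sequence [l.getD ri '!']) with h1 | h1 <;>
        rcases Bool.eq_false_or_eq_true (PySem.Chars.isalpha (l.getD ri '!')) with h2 | h2 <;>
          simp at hc ⊢ <;> simp_all
    cases hp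
    show ri < pvExtend l ri
    rw [pvExtend]
    have hmin : min ri (l.length - 1) = ri := by omega
    rw [dif_pos ⟨by rw [hmin]; exact hcond, h⟩]
    have := pvExtend_ge l (ri + 1); omega

-- while running_index < len(strin): pair = try alfanum… except IndexError → [ri, ri+1];
-- particles.append(strin[pair[0]:pair[1]]); running_index = pair[1]
def list_of_particles (l : List Char) (ri : Nat) : List (List Char) :=
  if h : ri < l.length then
    match hp : alfanum_str_interval l ri with
    | none => PySem.List.slice l (some (ri : Int)) (some ((ri + 1 : Nat) : Int)) :: list_of_particles l (ri + 1)
    | some p => PySem.List.slice l (some (p.1 : Int)) (some ((p.2 : Nat) : Int)) :: list_of_particles l p.2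
  else []
termination_by l.length - ri
decreasing_by
  · omega
  · have := alfanum_snd_gt l ri h _ hp; omega

-- for i in range(len(particles)): running += len(particles[particle_nro]); if index<running: return nro; nro += 1
def pvScanA (ps : List (List Char)) (index running nro : Int) : Int :=
  match ps with
  | [] => nro
  | p :: rest =>
    if index < running + (p.length : Int) then nro
    else pvScanA rest index (running + (p.length : Int)) (nro + 1)

def particle_nro_of_index (strin : String) (index : Int) : Int :=
  -- Python raises IndexError when index ∉ range(len(strin)); excluded by Pre_
  if 0 ≤ index ∧ index < (strin.toList.length : Int) then
    pvScanA (list_of_particles strin.toList 0) index 0 0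
  else 0

-- ===== PORT B =====
-- c in "0123456789." or c.isalpha() or c == " "
def pvTokB (c : Char) : Bool := (['0','1','2','3','4','5','6','7','8','9','.'].contains c) || PySem.Chars.isalpha c || (c == ' ')

-- e = i+1; while e < len(strin) and tok(strin[e]): e += 1
def pvExtendB (l : List Char) (e : Nat) : Nat :=
  if h : e < l.length ∧ pvTokB (l.getD e '!') = true then pvExtendB l (e + 1) else e
termination_by l.length - e
decreasing_by omega

-- end of the token starting at i
def pvStep (l : List Char) (i : Nat) : Nat :=
  if pvTokB (l.getD i '!') then pvExtendB l (i + 1) else i + 1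

theorem pvExtendB_ge (l : List Char) (e : Nat) : e ≤ pvExtendB l e := by
  rw [pvExtendB]
  split
  · have := pvExtendB_ge l (e + 1); omega
  · omega
termination_by l.length - e
decreasing_by omega

theorem pvStep_gt (l : List Char) (i : Nat) : i < pvStep l i := by
  unfold pvStep
  split
  · have := pvExtendB_ge l (i + 1); omega
  · omega

-- while i < len(strin): e = token end; if index < e: return count; i = e; count += 1
def pvGoB (l : List Char) (index : Int) (i : Nat) (count : Int) : Int :=
  if h : i < l.length then
    if index < (pvStep l i : Int) then count
    else pvGoB l index (pvStep l i) (count + 1)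
  else count
termination_by l.length - i
decreasing_by have := pvStep_gt l i; omega

def particle_nro_of_index_alt (strin : String) (index : Int) : Int :=
  -- same guard as A (Python B raises IndexError there too); excluded by Pre_
  if 0 ≤ index ∧ index < (strin.toList.length : Int) then
    pvGoB strin.toList index 0 0
  else 0

-- ===== PRECONDITION & SPEC =====
-- A (and B) raise IndexError unless 0 ≤ index < len(strin)
def Pre_particle_nro_of_index (strin : String) (index : Int) : Prop :=
  0 ≤ index ∧ index < (strin.toList.length : Int)
instance (strin : String) (index : Int) : Decidable (Pre_particle_nro_of_index strin index) := by
  unfold Pre_particle_nro_of_index; infer_instance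

def pvWitness_particle_nro_of_index : String × Int := ("ab 12, x", 5)

def Spec_particle_nro_of_index (strin : String) (index : Int) (out : Int) : Prop := out = particle_nro_of_index_alt strin index
instance (strin : String) (index : Int) (out : Int) : Decidable (Spec_particle_nro_of_index strin index out) := by unfold Spec_particle_nro_of_index; infer_instance

-- ===== CLAIM (what is proved, stated in full; the proofs are below) =====
def Claim_equal_particle_nro_of_index : Prop := ∀ (strin : String) (index : Int), Dom_particle_nro_of_index strin index → Pre_particle_nro_of_index strin index → Spec_particle_nro_of_index strin index (particle_nro_of_index strin index)

-- ===== LEMMAS AND PROOFS =====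

theorem pvCondA_eq (c : Char) : pvCondA c = pvTokB c := by
  unfold pvCondA pvTokB
  have h : is_nro_symbol_sequence [c] = (['0','1','2','3','4','5','6','7','8','9','.'].contains c) := by
    cases hc : (['0','1','2','3','4','5','6','7','8','9','.'].contains c) <;>
      simp only [is_nro_symbol_sequence] <;> rw [hc] <;> simp
  rw [h]

theorem pvExtendB_le (l : List Char) (e : Nat) (he : e ≤ l.length) : pvExtendB l e ≤ l.length := by
  rw [pvExtendB]
  split
  · rename_i h; exact pvExtendB_le l (e + 1) h.1
  · exact he
termination_by l.length - e
decreasing_by omega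

theorem pvExtendB_stop (l : List Char) (e : Nat) (h : pvExtendB l e < l.length) :
    pvTokB (l.getD (pvExtendB l e) '!') = false := by
  by_cases hc : e < l.length ∧ pvTokB (l.getD e '!') = true
  · rw [pvExtendB, dif_pos hc] at h ⊢
    exact pvExtendB_stop l (e + 1) h
  · rw [pvExtendB, dif_neg hc] at h ⊢
    cases ht : pvTokB (l.getD e '!')
    · rfl
    · exact absurd ⟨h, ht⟩ hc
termination_by l.length - e
decreasing_by omega

theorem pvExtend_eq (l : List Char) (e : Nat) : pvExtend l e = pvExtendB l e := by
  rw [pvExtend, pvExtendB]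
  by_cases he : e < l.length
  · have hmin : min e (l.length - 1) = e := by omega
    rw [hmin, pvCondA_eq]
    by_cases ht : pvTokB (l.getD e '!') = true
    · rw [dif_pos ⟨ht, he⟩, dif_pos ⟨he, ht⟩]
      exact pvExtend_eq l (e + 1)
    · rw [dif_neg (fun hh => ht hh.1), dif_neg (fun hh => ht hh.2)]
  · rw [dif_neg (fun hh => he hh.2), dif_neg (fun hh => he hh.1)]
termination_by l.length - e
decreasing_by omega

theorem pvShrink_stop (l : List Char) (s : Nat)
    (h : pvCondA (l.getD (s - 1) '!') = false) : pvShrink l s = s := by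
  rw [pvShrink, dif_neg]
  rintro ⟨h1, -⟩
  rw [h1] at h
  exact absurd h (by simp)

theorem pvShrink_one (l : List Char) (h : pvCondA (l.getD 0 '!') = true) : pvShrink l 1 = 0 := by
  rw [pvShrink, dif_pos ⟨by simpa using h, Nat.one_pos⟩, pvShrink, dif_neg (by simp)]

theorem pvAlfanum_none (l : List Char) (ri : Nat) (ht : pvTokB (l.getD ri '!') = false) :
    alfanum_str_interval l ri = none := by
  have hc : pvCondA (l.getD ri '!') = false := by rw [pvCondA_eq]; exact ht
  unfold pvCondA at hc
  simp only [Bool.or_eq_false_iff] at hc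
  rw [alfanum_str_interval, if_pos]
  refine ⟨hc.1.1, hc.1.2, ?_⟩
  simpa using hc.2

theorem pvAlfanum_some (l : List Char) (ri : Nat) (ht : pvTokB (l.getD ri '!') = true) :
    alfanum_str_interval l ri = some (pvShrink l (max ri 1), pvExtend l ri) := by
  have hc : pvCondA (l.getD ri '!') = true := by rw [pvCondA_eq]; exact ht
  unfold pvCondA at hc
  rw [alfanum_str_interval, if_neg]
  intro ⟨h1, h2, h3⟩
  rw [h1, h2] at hc
  simp at hc
  exact h3 hc

theorem pvSlice_len (l : List Char) (a b : Nat) (h2 : b ≤ l.length) :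
    (PySem.List.slice l (some (a : Int)) (some (b : Int))).length = b - a := by
  rw [PySem.List.slice_natCast]
  simp
  omega

-- loop invariant: at every call of the tokenizer, either we are at position 0, past the end,
-- just after a non-token char, or on a non-token char
def pvInv (l : List Char) (ri : Nat) : Prop :=
  ri = 0 ∨ l.length ≤ ri ∨ pvTokB (l.getD (ri - 1) '!') = false ∨ pvTokB (l.getD ri '!') = false

theorem pvMain (l : List Char) (index : Int) :
    ∀ n ri c, l.length - ri = n → pvInv l ri →
      pvScanA (list_of_particles l ri) index (ri : Int) c = pvGoB l index ri c := by
  intro n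
  induction n using Nat.strong_induction_on with
  | _ n IH =>
    intro ri c hn hinv
    by_cases h : ri < l.length
    · rw [pvGoB, dif_pos h, list_of_particles, dif_pos h]
      by_cases ht : pvTokB (l.getD ri '!') = true
      · -- token run starting at ri
        have hsome := pvAlfanum_some l ri ht
        split
        · rename_i hp; rw [hsome] at hp; exact absurd hp (by simp)
        · rename_i p hp
          rw [hsome] at hp
          injection hp with hp
          -- the backward scan never moves: p.1 = ri
          have hs : p.1 = ri := by
            rw [← hp]
            rcases hinv with h0 | h0 | h0 | h0
            · subst h0
              simpa using pvShrink_one l (by rw [pvCondA_eq]; exact ht)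
            · omega
            · rcases Nat.eq_zero_or_pos ri with hz | hz
              · subst hz
                simpa using pvShrink_one l (by rw [pvCondA_eq]; exact ht)
              · have hm : max ri 1 = ri := by omega
                rw [hm]
                exact pvShrink_stop l ri (by rw [pvCondA_eq]; exact h0)
            · rw [h0] at ht; exact absurd ht (by simp)
          -- the forward scans agree: p.2 = pvExtendB l (ri+1)
          have hmin : min ri (l.length - 1) = ri := by omega
          have he : p.2 = pvExtendB l (ri + 1) := by
            rw [← hp]
            show pvExtend l ri = _
            rw [pvExtend, dif_pos ⟨by rw [hmin, pvCondA_eq]; exact ht, h⟩]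
            exact pvExtend_eq l (ri + 1)
          have hge : ri + 1 ≤ pvExtendB l (ri + 1) := pvExtendB_ge l (ri + 1)
          have hle : pvExtendB l (ri + 1) ≤ l.length := pvExtendB_le l (ri + 1) h
          have hstep : pvStep l ri = pvExtendB l (ri + 1) := by rw [pvStep, if_pos ht]
          rw [hs, he, hstep]
          simp only [pvScanA]
          rw [pvSlice_len l ri (pvExtendB l (ri + 1)) hle]
          have hcast : (ri : Int) + ((pvExtendB l (ri + 1) - ri : Nat) : Int)
              = ((pvExtendB l (ri + 1) : Nat) : Int) := by omega
          rw [hcast]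
          by_cases hidx : index < ((pvExtendB l (ri + 1) : Nat) : Int)
          · rw [if_pos hidx, if_pos hidx]
          · rw [if_neg hidx, if_neg hidx]
            apply IH (l.length - pvExtendB l (ri + 1)) (by omega) _ _ rfl
            by_cases hE : pvExtendB l (ri + 1) < l.length
            · exact Or.inr (Or.inr (Or.inr (pvExtendB_stop l (ri + 1) hE)))
            · exact Or.inr (Or.inl (by omega))
      · -- single non-token char at ri
        have hnone := pvAlfanum_none l ri (by simpa using ht)
        split
        · -- pair = [ri, ri+1]
          have hstep : pvStep l ri = ri + 1 := by rw [pvStep, if_neg ht]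
          rw [hstep]
          simp only [pvScanA]
          rw [pvSlice_len l ri (ri + 1) (by omega)]
          have hcast : (ri : Int) + ((ri + 1 - ri : Nat) : Int) = ((ri + 1 : Nat) : Int) := by omega
          rw [hcast]
          by_cases hidx : index < ((ri + 1 : Nat) : Int)
          · rw [if_pos hidx, if_pos hidx]
          · rw [if_neg hidx, if_neg hidx]
            apply IH (l.length - (ri + 1)) (by omega) _ _ rfl
            exact Or.inr (Or.inr (Or.inl (by simpa using ht)))
        · rename_i p hp; rw [hnone] at hp; exact absurd hp (by simp)
    · rw [list_of_particles, dif_neg h, pvGoB, dif_neg h]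
      rfl

-- ===== VERDICT (by name: the statement is the Claim_ definition above) =====
theorem particle_nro_of_index_spec : Claim_equal_particle_nro_of_index := by
  intro strin index _ hpre
  unfold Pre_particle_nro_of_index at hpre
  unfold Spec_particle_nro_of_index particle_nro_of_index particle_nro_of_index_alt
  rw [if_pos hpre, if_pos hpre]
  simpa using pvMain strin.toList index strin.toList.length 0 0 (by omega) (Or.inl rfl)
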